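-- pv_equiv track=rewrite | github.com/huzheng1111/MCWS | utils.py | evaluate
-- ===== SOURCE A (Python) =====
-- def evaluate(y_pred, y, tag2index):
--     cor_num = 0
--     p_wordnum = y_pred.count(tag2index["E"]) + y_pred.count(tag2index["S"])
--     yt_wordnum = y.count(tag2index["E"]) + y.count(tag2index["S"])
--     start = 0
--     for i in range(len(y)):
--         if y[i] == tag2index["E"] or y[i] == tag2index["S"]:
--             flag = True
--             for j in range(start, i + 1):
--                 if y[j] != y_pred[j]:
--                     flag = False
--             if flag:
--                 cor_num += 1
--             start = i + 1
--     return cor_num, p_wordnum, yt_wordnum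
-- ===== SOURCE B (Python) =====
-- def evaluate(y_pred, y, tag2index):
--     e, s = tag2index["E"], tag2index["S"]
--     p_wordnum = y_pred.count(e) + y_pred.count(s)
--     yt_wordnum = y.count(e) + y.count(s)
--     cor_num = 0
--     match = True
--     for yt, pt in zip(y, y_pred):
--         if yt != pt:
--             match = False
--         if yt == e or yt == s:
--             if match:
--                 cor_num += 1
--             match = True
--     return cor_num, p_wordnum, yt_wordnum
-- ===== Notes on version B (the rewrite author's own statement) =====
-- stated objective: simpler
-- what changed: The quadratic nested re-scan of each word (inner loop from `start` to `i`) is replaced by one forward pass over zip(y, y_pred) that carries a boolean `match` flag, reset at each word end; the word counts keep the same .count calls.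
import Mathlib
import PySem

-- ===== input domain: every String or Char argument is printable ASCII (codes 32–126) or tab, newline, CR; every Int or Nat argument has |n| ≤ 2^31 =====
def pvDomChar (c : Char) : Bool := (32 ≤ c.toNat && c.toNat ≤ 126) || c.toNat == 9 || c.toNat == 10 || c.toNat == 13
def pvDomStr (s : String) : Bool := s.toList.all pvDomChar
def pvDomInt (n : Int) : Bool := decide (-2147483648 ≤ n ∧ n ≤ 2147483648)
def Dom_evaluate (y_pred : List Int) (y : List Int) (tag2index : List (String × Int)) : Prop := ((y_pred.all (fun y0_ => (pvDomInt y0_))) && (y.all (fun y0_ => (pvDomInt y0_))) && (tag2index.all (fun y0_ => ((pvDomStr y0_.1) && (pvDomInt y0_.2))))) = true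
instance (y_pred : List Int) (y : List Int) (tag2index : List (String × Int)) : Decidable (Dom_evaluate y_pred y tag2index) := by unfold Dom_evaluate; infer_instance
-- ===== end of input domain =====

-- ===== PORT A =====
-- B is a single forward pass with a carried `match` flag instead of A's nested per-word re-scan;
-- same return value wherever A returns normally.
def evaluate (y_pred : List Int) (y : List Int) (tag2index : List (String × Int)) : Int × Int × Int :=
  match (PySem.Dict.mk tag2index).get? "E", (PySem.Dict.mk tag2index).get? "S" with
  | some e, some s =>
    let p_wordnum : Int := PySem.List.count y_pred e + PySem.List.count y_pred s
    let yt_wordnum : Int := PySem.List.count y e + PySem.List.count y s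
    let st := (PySem.List.pyRange 0 (y.length : Int) 1).foldl
      (fun (st : Int × Int) (i : Int) =>
        if PySem.List.pyGetD y i 0 = e ∨ PySem.List.pyGetD y i 0 = s then
          let flag := (PySem.List.pyRange st.2 (i + 1) 1).foldl
            (fun (f : Bool) (j : Int) =>
              if PySem.List.pyGetD y j 0 ≠ PySem.List.pyGetD y_pred j 0 then false else f) true
          ((if flag then st.1 + 1 else st.1), i + 1)
        else st) (0, 0)
    (st.1, p_wordnum, yt_wordnum)
  | _, _ => (0, 0, 0)   -- KeyError in Python: excluded by Pre_evaluate

-- ===== PORT B =====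
def evaluate_alt (y_pred : List Int) (y : List Int) (tag2index : List (String × Int)) : Int × Int × Int :=
  (((PySem.Dict.mk tag2index).get? "E").bind (fun e =>
    ((PySem.Dict.mk tag2index).get? "S").map (fun s =>
      let p_wordnum : Int := PySem.List.count y_pred e + PySem.List.count y_pred s
      let yt_wordnum : Int := PySem.List.count y e + PySem.List.count y s
      let st := (y.zip y_pred).foldl
        (fun (st : Int × Bool) (p : Int × Int) =>
          let m := if p.1 ≠ p.2 then false else st.2
          if p.1 = e ∨ p.1 = s then ((if m then st.1 + 1 else st.1), true)
          else (st.1, m)) (0, true)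
      (st.1, p_wordnum, yt_wordnum)))).getD (0, 0, 0)   -- KeyError in Python: excluded by Pre_evaluate

-- ===== PRECONDITION & SPEC =====
-- Pre_: both tag keys present (else Python raises KeyError) and no word-end tag of y at an
-- index ≥ len(y_pred) (else A's inner scan raises IndexError); exactly where A returns.
def preB (y_pred : List Int) (y : List Int) (tag2index : List (String × Int)) : Bool :=
  (((PySem.Dict.mk tag2index).get? "E").bind (fun e =>
    ((PySem.Dict.mk tag2index).get? "S").map (fun s =>
      (y.drop y_pred.length).all (fun t => t ≠ e && t ≠ s)))).getD false
def Pre_evaluate (y_pred : List Int) (y : List Int) (tag2index : List (String × Int)) : Prop :=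
  preB y_pred y tag2index = true
instance (y_pred : List Int) (y : List Int) (tag2index : List (String × Int)) : Decidable (Pre_evaluate y_pred y tag2index) := by unfold Pre_evaluate; infer_instance

def pvWitness_evaluate : List Int × List Int × (List (String × Int)) :=
  ([1, 2, 1, 3], [1, 2, 2, 3], [("E", 2), ("S", 3)])

def Spec_evaluate (y_pred : List Int) (y : List Int) (tag2index : List (String × Int)) (out : Int × Int × Int) : Prop := out = evaluate_alt y_pred y tag2index
instance (y_pred : List Int) (y : List Int) (tag2index : List (String × Int)) (out : Int × Int × Int) : Decidable (Spec_evaluate y_pred y tag2index out) := by unfold Spec_evaluate; infer_instance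

-- ===== CLAIM (what is proved, stated in full; the proofs are below) =====
def Claim_equal_evaluate : Prop := ∀ (y_pred : List Int) (y : List Int) (tag2index : List (String × Int)), Dom_evaluate y_pred y tag2index → Pre_evaluate y_pred y tag2index → Spec_evaluate y_pred y tag2index (evaluate y_pred y tag2index)
-- ===== LEMMAS AND PROOFS =====

-- A's inner flag scan is an `all` over the same range (generalized accumulator).
theorem foldl_flag_eq_all (y y_pred : List Int) (l : List Int) (b : Bool) :
    l.foldl (fun (f : Bool) (j : Int) =>
        if PySem.List.pyGetD y j 0 ≠ PySem.List.pyGetD y_pred j 0 then false else f) b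
    = (b && l.all (fun j => PySem.List.pyGetD y j 0 == PySem.List.pyGetD y_pred j 0)) := by
  induction l generalizing b with
  | nil => simp
  | cons x l ih =>
    simp only [List.foldl_cons, List.all_cons, ih]
    by_cases h : PySem.List.pyGetD y x 0 = PySem.List.pyGetD y_pred x 0 <;>
      simp [h]

-- Outer-loop steps at non-tag positions leave A's state unchanged.
theorem tail_id (y y_pred : List Int) (e s : Int) (l : List Int) (st : Int × Int)
    (h : ∀ i ∈ l, ¬(PySem.List.pyGetD y i 0 = e ∨ PySem.List.pyGetD y i 0 = s)) :
    l.foldl (fun (st : Int × Int) (i : Int) =>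
        if PySem.List.pyGetD y i 0 = e ∨ PySem.List.pyGetD y i 0 = s then
          let flag := (PySem.List.pyRange st.2 (i + 1) 1).foldl
            (fun (f : Bool) (j : Int) =>
              if PySem.List.pyGetD y j 0 ≠ PySem.List.pyGetD y_pred j 0 then false else f) true
          ((if flag then st.1 + 1 else st.1), i + 1)
        else st) st = st := by
  induction l generalizing st with
  | nil => rfl
  | cons x l ih =>
    have hx := h x (List.mem_cons_self)
    simp only [List.foldl_cons, if_neg hx]
    exact ih st (fun i hi => h i (List.mem_cons_of_mem _ hi))

-- Core correspondence: A's index fold from k with word start ws equals B's zip fold over the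
-- dropped suffixes, when the carried flag m records agreement on [ws, k).
theorem loop_corr_aux (y_pred y : List Int) (e s : Int) (n : Nat) :
    ∀ (k ws : Nat) (c : Int) (m : Bool), y.length ≤ k + n → ws ≤ k →
    ((y.drop y_pred.length).all (fun t => t ≠ e && t ≠ s)) = true →
    m = (PySem.List.pyRange (ws : Int) (k : Int) 1).all
          (fun j => PySem.List.pyGetD y j 0 == PySem.List.pyGetD y_pred j 0) →
    ((PySem.List.pyRange (k : Int) (y.length : Int) 1).foldl
      (fun (st : Int × Int) (i : Int) =>
        if PySem.List.pyGetD y i 0 = e ∨ PySem.List.pyGetD y i 0 = s then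
          let flag := (PySem.List.pyRange st.2 (i + 1) 1).foldl
            (fun (f : Bool) (j : Int) =>
              if PySem.List.pyGetD y j 0 ≠ PySem.List.pyGetD y_pred j 0 then false else f) true
          ((if flag then st.1 + 1 else st.1), i + 1)
        else st) (c, (ws : Int))).1
    = (((y.drop k).zip (y_pred.drop k)).foldl
      (fun (st : Int × Bool) (p : Int × Int) =>
        let m := if p.1 ≠ p.2 then false else st.2
        if p.1 = e ∨ p.1 = s then ((if m then st.1 + 1 else st.1), true)
        else (st.1, m)) (c, m)).1 := by
  induction n with
  | zero =>
    intro k ws c m hkn hws htail hm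
    have h1 : (y.length : Int) ≤ (k : Int) := by omega
    have h2 : y.drop k = [] := List.drop_eq_nil_of_le (by omega)
    rw [PySem.List.pyRange_one_eq_nil h1, h2]
    rfl
  | succ n ih =>
    intro k ws c m hkn hws htail hm
    by_cases hk : y.length ≤ k
    · have h2 : y.drop k = [] := List.drop_eq_nil_of_le hk
      rw [PySem.List.pyRange_one_eq_nil (by omega), h2]
      rfl
    · rw [Nat.not_le] at hk
      have hyk : PySem.List.pyGetD y (k : Int) 0 = y[k] := by
        rw [PySem.List.pyGetD_natCast]
        exact List.getD_eq_getElem y 0 hk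
      by_cases hkp : y_pred.length ≤ k
      · -- past the end of y_pred: no tags remain (Pre_), both folds are settled
        have hnt : ∀ i ∈ PySem.List.pyRange (k : Int) (y.length : Int) 1,
            ¬(PySem.List.pyGetD y i 0 = e ∨ PySem.List.pyGetD y i 0 = s) := by
          intro i hi
          rw [PySem.List.mem_pyRange_one] at hi
          have h0 : (0:Int) ≤ i := by omega
          have hilt : i < (y.length : Int) := hi.2
          have hig : PySem.List.pyGetD y i 0 = y[i.toNat] :=
            PySem.List.pyGetD_eq_getElem y (i := i) 0 h0 hilt
          have hmem : y[i.toNat] ∈ y.drop y_pred.length := by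
            have hlt : i.toNat - y_pred.length < (y.drop y_pred.length).length := by
              simp [List.length_drop]; omega
            have : (y.drop y_pred.length)[i.toNat - y_pred.length] = y[i.toNat] := by
              rw [List.getElem_drop]
              congr 1
              omega
            rw [← this]
            exact List.getElem_mem hlt
          have := (List.all_eq_true.mp htail) _ hmem
          simp only [Bool.and_eq_true, decide_eq_true_eq] at this
          rw [hig]
          exact not_or.mpr ⟨this.1, this.2⟩
        rw [tail_id y y_pred e s _ _ hnt]
        have h2 : y_pred.drop k = [] := List.drop_eq_nil_of_le hkp
        rw [h2, List.zip_nil_right]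
        rfl
      · rw [Nat.not_le] at hkp
        have hpk : PySem.List.pyGetD y_pred (k : Int) 0 = y_pred[k] := by
          rw [PySem.List.pyGetD_natCast]
          exact List.getD_eq_getElem y_pred 0 hkp
        -- unfold one step of each fold
        rw [PySem.List.pyRange_one_cons (by exact_mod_cast hk),
            List.drop_eq_getElem_cons hk, List.drop_eq_getElem_cons hkp,
            List.zip_cons_cons]
        simp only [List.foldl_cons]
        have hcast : (k : Int) + 1 = ((k + 1 : Nat) : Int) := by push_cast; ring
        have hflag : (PySem.List.pyRange (ws : Int) ((k : Int) + 1) 1).foldl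
            (fun (f : Bool) (j : Int) =>
              if PySem.List.pyGetD y j 0 ≠ PySem.List.pyGetD y_pred j 0 then false else f) true
            = (m && (y[k] == y_pred[k])) := by
          rw [PySem.List.pyRange_one_append (ws : Int) (k : Int) ((k : Int) + 1)
              (by exact_mod_cast hws) (by omega),
            PySem.List.pyRange_one_singleton, List.foldl_append, foldl_flag_eq_all,
            foldl_flag_eq_all]
          simp [hm, hyk, hpk]
        by_cases htag : y[k] = e ∨ y[k] = s
        · simp only [hyk, if_pos htag, hflag]
          have hm' : (if y[k] ≠ y_pred[k] then false else m) = (m && (y[k] == y_pred[k])) := by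
            by_cases hq : y[k] = y_pred[k] <;> simp [hq]
          rw [← hm']
          have := ih (k + 1) (k + 1) (if (if y[k] ≠ y_pred[k] then false else m) = true then c + 1 else c)
            true (by omega) (le_refl _) htail
            (by rw [PySem.List.pyRange_one_eq_nil (le_refl _)]; rfl)
          rw [hcast]
          exact this
        · simp only [hyk, if_neg htag]
          have := ih (k + 1) ws c (if y[k] ≠ y_pred[k] then false else m) (by omega) (by omega) htail ?_
          · rw [hcast]; exact this
          · rw [← hcast, PySem.List.pyRange_one_succ_right (show (ws:Int) ≤ (k:Int) by exact_mod_cast hws), List.all_append, ← hm]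
            by_cases hq : y[k] = y_pred[k] <;> simp [hq, hyk, hpk]

-- ===== VERDICT (by name: the statement is the Claim_ definition above) =====
theorem evaluate_spec : Claim_equal_evaluate := by
  intro y_pred y tag2index _ hpre
  unfold Spec_evaluate evaluate evaluate_alt
  unfold Pre_evaluate preB at hpre
  cases hE : (PySem.Dict.mk tag2index).get? "E" with
  | none => rw [hE] at hpre; simp at hpre
  | some e =>
    cases hS : (PySem.Dict.mk tag2index).get? "S" with
    | none => rw [hE, hS] at hpre; simp at hpre
    | some s =>
      rw [hE, hS] at hpre
      simp only [Option.bind_some, Option.map_some, Option.getD_some] at hpre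
      have h := loop_corr_aux y_pred y e s y.length 0 0 0 true (by omega) (le_refl 0) hpre
        (by rw [PySem.List.pyRange_one_eq_nil (le_refl _)]; rfl)
      simp only [Nat.cast_zero, List.drop_zero] at h
      simp only [hE, hS, Option.bind_some, Option.map_some, Option.getD_some]
      simp only [h]
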